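-- pv_equiv track=rewrite | github.com/pypi-data/pypi-mirror-29 | packages/persephone/persephone-0.1.8.tar.gz/persephone-0.1.8/persephone/distance.py | cluster_alignment_errors
-- ===== SOURCE A (Python) =====
-- def cluster_alignment_errors(alignment):
--     """Takes an alignment created by min_edit_distance_align() and groups
--     consecutive errors together. This is useful, because there are often
--     many possible alignments, and so often we can't meaningfully distinguish
--     between alignment errors at the character level, so it makes many-to-many
--     mistakes more readable."""
--
--     newalign = []
--     mistakes = ([],[])
--     for align_item in alignment:
--         if align_item[0] == align_item[1]:
--             if mistakes != ([],[]):
--                 newalign.append((tuple(mistakes[0]), tuple(mistakes[1])))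
--                 mistakes = ([],[])
--             newalign.append((tuple([align_item[0]]), tuple([align_item[1]])))
--         else:
--             if align_item[0] != "":
--                 mistakes[0].append(align_item[0])
--             if align_item[1] != "":
--                 mistakes[1].append(align_item[1])
--     if mistakes != ([],[]):
--         newalign.append((tuple(mistakes[0]), tuple(mistakes[1])))
--         mistakes = ([],[])
--
--     return newalign
-- ===== SOURCE B (Python) =====
-- def cluster_alignment_errors(alignment):
--     """Recursive run-splitting reformulation: a matching head is emitted
--     alone; a mismatching head starts a maximal mismatch run which is
--     combined into one pair, then recurse on the remainder."""
--     if not alignment: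
--         return []
--     a, b = alignment[0]
--     if a == b:
--         return [((a,), (b,))] + cluster_alignment_errors(alignment[1:])
--     k = 1
--     while k < len(alignment) and alignment[k][0] != alignment[k][1]:
--         k += 1
--     run = alignment[:k]
--     left = tuple(x for x, _ in run if x != "")
--     right = tuple(y for _, y in run if y != "")
--     return [(left, right)] + cluster_alignment_errors(alignment[k:])
-- ===== Notes on version B (the rewrite author's own statement) =====
-- stated objective: alternative
-- what changed: Replaced the single accumulator loop with a pending-mistakes buffer and end-of-loop flush by a recursion that splits the input into maximal runs: a matching head is emitted directly, a maximal mismatch run is combined into one pair in a single step, then it recurses on the remainder.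
import Mathlib
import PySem

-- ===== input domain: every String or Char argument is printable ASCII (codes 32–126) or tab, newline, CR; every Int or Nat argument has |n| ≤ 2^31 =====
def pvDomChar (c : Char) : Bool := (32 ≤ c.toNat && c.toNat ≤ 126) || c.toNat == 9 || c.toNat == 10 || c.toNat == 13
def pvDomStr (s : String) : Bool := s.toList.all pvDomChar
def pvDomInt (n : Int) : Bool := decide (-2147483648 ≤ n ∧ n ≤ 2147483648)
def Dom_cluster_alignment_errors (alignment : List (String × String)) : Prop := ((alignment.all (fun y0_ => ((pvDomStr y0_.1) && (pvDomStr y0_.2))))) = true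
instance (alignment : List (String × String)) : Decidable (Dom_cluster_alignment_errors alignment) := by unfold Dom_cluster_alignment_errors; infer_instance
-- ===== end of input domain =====

-- B replaces A's pending-mistakes accumulator and final flush by a recursion over
-- maximal runs (objective: alternative decomposition, same cost).

-- ===== PORT A =====
-- one step of A's for-loop; state = (newalign, mistakes)
def pvStepA (st : List (List String × List String) × (List String × List String))
    (it : String × String) : List (List String × List String) × (List String × List String) :=
  if it.1 = it.2 then
    let na := if st.2 ≠ (([], []) : List String × List String) then st.1 ++ [st.2] else st.1
    (na ++ [([it.1], [it.2])], ([], []))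
  else
    (st.1, (if it.1 ≠ "" then st.2.1 ++ [it.1] else st.2.1,
            if it.2 ≠ "" then st.2.2 ++ [it.2] else st.2.2))

def cluster_alignment_errors (alignment : List (String × String)) : List (List String × List String) :=
  let st := alignment.foldl pvStepA ([], ([], []))
  if st.2 ≠ (([], []) : List String × List String) then st.1 ++ [st.2] else st.1

-- ===== PORT B =====
def cluster_alignment_errors_alt (alignment : List (String × String)) : List (List String × List String) :=
  match alignment with
  | [] => []
  | (a, b) :: rest =>
    if a = b then
      ([a], [b]) :: cluster_alignment_errors_alt rest
    else
      -- maximal mismatch run starting at the head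
      let run := (a, b) :: rest.takeWhile (fun p => p.1 ≠ p.2)
      (run.filterMap (fun p => if p.1 ≠ "" then some p.1 else none),
       run.filterMap (fun p => if p.2 ≠ "" then some p.2 else none))
        :: cluster_alignment_errors_alt (rest.dropWhile (fun p => p.1 ≠ p.2))
termination_by alignment.length
decreasing_by
  · simp
  · simpa using Nat.lt_succ_of_le (List.length_dropWhile_le _ _)

-- ===== PRECONDITION & SPEC =====
def Spec_cluster_alignment_errors (alignment : List (String × String)) (out : List (List String × List String)) : Prop := out = cluster_alignment_errors_alt alignment
instance (alignment : List (String × String)) (out : List (List String × List String)) : Decidable (Spec_cluster_alignment_errors alignment out) := by unfold Spec_cluster_alignment_errors; infer_instance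

-- ===== CLAIM (what is proved, stated in full; the proofs are below) =====
def Claim_equal_cluster_alignment_errors : Prop := ∀ (alignment : List (String × String)), Dom_cluster_alignment_errors alignment → Spec_cluster_alignment_errors alignment (cluster_alignment_errors alignment)

-- ===== LEMMAS AND PROOFS =====

-- B's recursion, parametrised by A's pending-mistakes accumulator.
def pvAltFrom (m : List String × List String) :
    List (String × String) → List (List String × List String)
  | [] => if m ≠ (([], []) : List String × List String) then [m] else []
  | (a, b) :: rest =>
    if a = b then
      (if m ≠ (([], []) : List String × List String) then [m] else []) ++
        ([a], [b]) :: pvAltFrom ([], []) rest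
    else
      pvAltFrom (if a ≠ "" then m.1 ++ [a] else m.1, if b ≠ "" then m.2 ++ [b] else m.2) rest

-- A's fold-then-flush equals na ++ pvAltFrom m l.
lemma pvFold_eq_altFrom (l : List (String × String))
    (na : List (List String × List String)) (m : List String × List String) :
    (let st := l.foldl pvStepA (na, m)
     if st.2 ≠ (([], []) : List String × List String) then st.1 ++ [st.2] else st.1) =
    na ++ pvAltFrom m l := by
  induction l generalizing na m with
  | nil =>
    simp only [List.foldl, pvAltFrom]
    split <;> simp
  | cons hd tl ih =>
    obtain ⟨a, b⟩ := hd
    simp only [List.foldl, pvStepA, pvAltFrom]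
    by_cases hab : a = b
    · simp only [hab, if_true]
      rw [ih]
      split <;> simp
    · simp only [if_neg hab]
      rw [ih]

def pvTw (l : List (String × String)) : List (String × String) :=
  l.takeWhile (fun p => p.1 ≠ p.2)
def pvDw (l : List (String × String)) : List (String × String) :=
  l.dropWhile (fun p => p.1 ≠ p.2)
def pvL (m : List String × List String) (l : List (String × String)) :
    List String × List String :=
  (m.1 ++ (pvTw l).filterMap (fun p => if p.1 ≠ "" then some p.1 else none),
   m.2 ++ (pvTw l).filterMap (fun p => if p.2 ≠ "" then some p.2 else none))

lemma pvAlt_nil : cluster_alignment_errors_alt [] = [] := by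
  rw [cluster_alignment_errors_alt.eq_def]

lemma pvAlt_cons_eq (a b : String) (rest : List (String × String)) (h : a = b) :
    cluster_alignment_errors_alt ((a, b) :: rest) =
      ([a], [b]) :: cluster_alignment_errors_alt rest := by
  rw [cluster_alignment_errors_alt.eq_def]
  simp [h]

lemma pvAlt_cons_ne (a b : String) (rest : List (String × String)) (h : ¬ a = b) :
    cluster_alignment_errors_alt ((a, b) :: rest) =
      (((a, b) :: rest.takeWhile (fun p => p.1 ≠ p.2)).filterMap
          (fun p => if p.1 ≠ "" then some p.1 else none),
       ((a, b) :: rest.takeWhile (fun p => p.1 ≠ p.2)).filterMap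
          (fun p => if p.2 ≠ "" then some p.2 else none))
        :: cluster_alignment_errors_alt (rest.dropWhile (fun p => p.1 ≠ p.2)) := by
  rw [cluster_alignment_errors_alt.eq_def]
  simp [h]

-- unfolding alt one run at a time
lemma pvAlt_run (l : List (String × String)) :
    cluster_alignment_errors_alt l =
      (if pvL ([], []) l ≠ (([], []) : List String × List String)
        then [pvL ([], []) l] else []) ++ cluster_alignment_errors_alt (pvDw l) := by
  match l with
  | [] => simp [pvL, pvTw, pvDw, pvAlt_nil]
  | (a, b) :: rest =>
    by_cases hab : a = b
    · simp [pvL, pvTw, pvDw, List.takeWhile, List.dropWhile, hab]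
    · rw [pvAlt_cons_ne a b rest hab]
      simp only [pvL, pvTw, pvDw, List.takeWhile, List.dropWhile]
      simp only [ne_eq, hab, not_false_iff, decide_true, decide_not]
      split
      · rfl
      · rename_i h
        exfalso
        obtain ⟨h1, h2⟩ := Prod.mk.injEq .. ▸ (not_not.mp h)
        by_cases ha : a = ""
        · by_cases hb : b = ""
          · exact hab (ha.trans hb.symm)
          · simp [List.filterMap, hb] at h2
        · simp [List.filterMap, ha] at h1

lemma pvAltFrom_eq (l : List (String × String)) (m : List String × List String) :
    pvAltFrom m l =
      (if pvL m l ≠ (([], []) : List String × List String) then [pvL m l] else []) ++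
        cluster_alignment_errors_alt (pvDw l) := by
  induction l generalizing m with
  | nil =>
    obtain ⟨m1, m2⟩ := m
    simp [pvAltFrom, pvL, pvTw, pvDw, pvAlt_nil]
  | cons hd tl ih =>
    obtain ⟨a, b⟩ := hd
    by_cases hab : a = b
    · simp only [pvAltFrom, if_pos hab]
      rw [ih ([], []), ← pvAlt_run tl]
      have h1 : pvL m ((a, b) :: tl) = m := by
        simp [pvL, pvTw, List.takeWhile, hab]
      have h2 : pvDw ((a, b) :: tl) = (a, b) :: tl := by
        simp [pvDw, List.dropWhile, hab]
      rw [h1, h2, pvAlt_cons_eq a b tl hab]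
    · simp only [pvAltFrom, if_neg hab]
      rw [ih]
      have htw : pvTw ((a, b) :: tl) = (a, b) :: pvTw tl := by
        simp [pvTw, List.takeWhile, hab]
      have hdw : pvDw ((a, b) :: tl) = pvDw tl := by
        simp [pvDw, List.dropWhile, hab]
      have hL : pvL (if a ≠ "" then m.1 ++ [a] else m.1,
                     if b ≠ "" then m.2 ++ [b] else m.2) tl = pvL m ((a, b) :: tl) := by
        simp only [pvL, htw, List.filterMap]
        by_cases ha : a = "" <;> by_cases hb : b = "" <;> simp [ha, hb]
      rw [hL, hdw]

-- ===== VERDICT (by name: the statement is the Claim_ definition above) =====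
theorem cluster_alignment_errors_spec : Claim_equal_cluster_alignment_errors := by
  intro alignment _
  unfold Spec_cluster_alignment_errors cluster_alignment_errors
  rw [pvFold_eq_altFrom alignment [] ([], [])]
  rw [pvAltFrom_eq]
  rw [← pvAlt_run]
  simp
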